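-- pv_equiv track=rewrite | github.com/carlosmuller/bt-dualboot | bt_dualboot/bt_windows/convert.py | hex_string_to_pairs
-- ===== SOURCE A (Python) =====
-- def hex_string_to_pairs(hex_string):
--     """Convert hex string to pairs array
--     Args:
--         hex_string (str): kind of 'D51FFA421C4C'
--
--     Returns:
--         list: kind of [D5, 1F, FA, 42, 1C, 4C]
--     """
--     buf = hex_string
--     buf_len = len(buf)
--
--     if buf_len % 2 != 0:
--         raise RuntimeError(f"wrong hex string={hex_string}")
--
--     pairs_count = int(buf_len / 2)
--
--     pairs = []
--     for i in range(pairs_count):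
--         start = i * 2
--         end = start + 2
--         pairs.append(buf[start:end])
--
--     return pairs
-- ===== SOURCE B (Python) =====
-- def hex_string_to_pairs(hex_string):
--     """Convert hex string to pairs array (strided zip instead of index loop)."""
--     if len(hex_string) % 2 != 0:
--         raise RuntimeError(f"wrong hex string={hex_string}")
--     return [''.join(p) for p in zip(hex_string[::2], hex_string[1::2])]
-- ===== Notes on version B (the rewrite author's own statement) =====
-- stated objective: idiomatic
-- what changed: Replaces the explicit index loop slicing buf[i*2:i*2+2] by zipping the two strided subsequences hex_string[::2] and hex_string[1::2] and joining each pair.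
import Mathlib
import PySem

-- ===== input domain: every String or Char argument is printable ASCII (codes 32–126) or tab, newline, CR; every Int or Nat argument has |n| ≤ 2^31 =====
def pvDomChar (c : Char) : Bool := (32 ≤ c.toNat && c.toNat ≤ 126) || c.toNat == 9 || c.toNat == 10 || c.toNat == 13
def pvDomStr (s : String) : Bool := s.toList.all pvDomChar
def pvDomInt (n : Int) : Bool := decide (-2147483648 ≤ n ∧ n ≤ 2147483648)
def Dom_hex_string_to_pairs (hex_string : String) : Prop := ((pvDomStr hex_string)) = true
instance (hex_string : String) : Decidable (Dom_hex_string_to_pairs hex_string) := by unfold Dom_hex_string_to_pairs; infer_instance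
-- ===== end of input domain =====

-- B replaces A's index loop over 2-char slices by zipping the two strided subsequences s[::2] and s[1::2] (idiomatic, same cost).
-- Both Pythons raise RuntimeError on odd-length input; Pre_ excludes exactly those.

-- ===== PORT A =====
def hex_string_to_pairs (hex_string : String) : List String :=
  let buf := hex_string.toList
  let buf_len : Int := (buf.length : Int)
  if PySem.Int.mod buf_len 2 ≠ 0 then []   -- Python: raise RuntimeError (excluded by Pre_)
  else
    let pairs_count := PySem.Int.truncdiv buf_len 2   -- int(buf_len / 2)
    (PySem.List.pyRange 0 pairs_count 1).foldl
      (fun pairs i =>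
        let start := i * 2
        let stop := start + 2
        pairs ++ [String.ofList (PySem.List.slice buf (some start) (some stop))]) []

-- ===== PORT B =====
def hex_string_to_pairs_alt (hex_string : String) : List String :=
  let cs := hex_string.toList
  if PySem.Int.mod (cs.length : Int) 2 ≠ 0 then []   -- Python: raise RuntimeError (excluded by Pre_)
  else
    let evens := (PySem.List.slice? cs none none 2).getD []      -- hex_string[::2]; step ≠ 0 so never none
    let odds := (PySem.List.slice? cs (some 1) none 2).getD []   -- hex_string[1::2]
    (evens.zip odds).map (fun p => String.ofList [p.1, p.2])

-- ===== PRECONDITION & SPEC =====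
-- Pre_ excludes exactly the odd-length strings, on which the Python A raises RuntimeError.
def Pre_hex_string_to_pairs (hex_string : String) : Prop := hex_string.toList.length % 2 = 0
instance (hex_string : String) : Decidable (Pre_hex_string_to_pairs hex_string) := by unfold Pre_hex_string_to_pairs; infer_instance
def pvWitness_hex_string_to_pairs : String := "D51FFA421C4C"

def Spec_hex_string_to_pairs (hex_string : String) (out : List String) : Prop := out = hex_string_to_pairs_alt hex_string
instance (hex_string : String) (out : List String) : Decidable (Spec_hex_string_to_pairs hex_string out) := by unfold Spec_hex_string_to_pairs; infer_instance

-- ===== CLAIM (what is proved, stated in full; the proofs are below) =====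
def Claim_equal_hex_string_to_pairs : Prop := ∀ (hex_string : String), Dom_hex_string_to_pairs hex_string → Pre_hex_string_to_pairs hex_string → Spec_hex_string_to_pairs hex_string (hex_string_to_pairs hex_string)

-- ===== LEMMAS AND PROOFS =====

-- the two strided slices of an even-length list, as index filterMaps
lemma evens_eq (cs : List Char) (m : Nat) (h : cs.length = 2*m) :
    PySem.List.slice? cs none none 2
      = some (List.filterMap (fun k => cs[2*k]?) (List.range m)) := by
  simp only [PySem.List.slice?, PySem.List.sliceIndices, h]
  norm_num
  have hc : (if 0 < m then (((2*(m:Int)) + 2 - 1) / 2).toNat else 0) = m := by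
    split <;> omega
  rw [hc]
  congr 1

lemma odds_eq (cs : List Char) (m : Nat) (h : cs.length = 2*m) :
    PySem.List.slice? cs (some 1) none 2
      = some (List.filterMap (fun k => cs[2*k+1]?) (List.range m)) := by
  simp only [PySem.List.slice?, PySem.List.sliceIndices, h]
  norm_num
  have h1 : min 1 (2*(m:Int)) = if 0 < m then 1 else 0 := by split <;> omega
  rw [h1]
  by_cases hm : 0 < m
  · simp only [if_pos hm]
    have hlt : (1:Int) < 2*m := by omega
    rw [if_pos hlt]
    have hc : (((2*(m:Int)) - 1 + 2 - 1) / 2).toNat = m := by omega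
    rw [hc]
    congr 1
    funext k
    congr 1
    omega
  · have hm0 : m = 0 := by omega
    subst hm0
    norm_num

-- an in-range index filterMap is a map
lemma fm_getD (cs : List Char) (f : Nat → Nat) (m : Nat) (h : ∀ k < m, f k < cs.length) :
    List.filterMap (fun k => cs[f k]?) (List.range m)
      = (List.range m).map (fun k => cs.getD (f k) 'a') := by
  induction m with
  | zero => simp
  | succ m ih =>
    rw [List.range_succ, List.filterMap_append, List.map_append,
        ih (fun k hk => h k (Nat.lt_succ_of_lt hk))]
    simp [List.getElem?_eq_getElem (h m (Nat.lt_succ_self m))]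

lemma take_two_drop (cs : List Char) (i : Nat) (h : i + 1 < cs.length) :
    (cs.drop i).take 2 = [cs.getD i 'a', cs.getD (i+1) 'a'] := by
  have h1 : i < cs.length := by omega
  rw [List.getD_eq_getElem _ _ h1, List.getD_eq_getElem _ _ h,
      List.drop_eq_getElem_cons h1, List.drop_eq_getElem_cons h]
  rfl

lemma truncdiv_two_mul (m : Nat) : PySem.Int.truncdiv (2*(m:Int)) 2 = (m : Int) := by
  simp [PySem.Int.truncdiv]

lemma mod_two_zero (n : Nat) (h : n % 2 = 0) : PySem.Int.mod ((n : Int)) 2 = 0 := by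
  rw [show ((2:Int)) = ((2:Nat):Int) from rfl, PySem.Int.mod_natCast, h]
  rfl

lemma a_canon (cs : List Char) (m : Nat) (hm : cs.length = 2*m) :
    (PySem.List.pyRange 0 (PySem.Int.truncdiv ((cs.length : Int)) 2) 1).foldl
      (fun pairs i =>
        let start := i * 2
        let stop := start + 2
        pairs ++ [String.ofList (PySem.List.slice cs (some start) (some stop))]) []
    = (List.range m).map (fun k => String.ofList [cs.getD (2*k) 'a', cs.getD (2*k+1) 'a']) := by
  rw [hm, show ((2*m : Nat) : Int) = 2*(m:Int) by push_cast; ring, truncdiv_two_mul,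
      PySem.List.pyRange_one, show ((m:Int) - 0).toNat = m by omega, List.foldl_map]
  rw [PySem.List.foldl_append_singleton_eq_map
        (fun k : Nat => String.ofList (PySem.List.slice cs (some ((0 + (k:Int)) * 2)) (some ((0 + (k:Int)) * 2 + 2)))) (List.range m) []]
  simp only [List.nil_append]
  apply List.map_congr_left
  intro k hk
  have hkm : k < m := by simpa using hk
  have hb : 2*k + 1 < cs.length := by omega
  have h0 : ((0 + (k:Int)) * 2) = ((2*k : Nat) : Int) := by push_cast; ring
  have h2 : ((0 + (k:Int)) * 2 + 2) = ((2*k + 2 : Nat) : Int) := by push_cast; ring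
  rw [h0, show ((2*k : Nat) : Int) + 2 = ((2*k + 2 : Nat) : Int) by push_cast; ring,
      PySem.List.slice_toNat _ (by positivity) (by positivity),
      show ((2*k+2 : Nat) : Int).toNat - ((2*k : Nat) : Int).toNat = 2 by omega,
      show ((2*k : Nat) : Int).toNat = 2*k by omega, take_two_drop cs (2*k) hb]

lemma b_canon (cs : List Char) (m : Nat) (hm : cs.length = 2*m) :
    (((PySem.List.slice? cs none none 2).getD []).zip
        ((PySem.List.slice? cs (some 1) none 2).getD [])).map (fun p => String.ofList [p.1, p.2])
    = (List.range m).map (fun k => String.ofList [cs.getD (2*k) 'a', cs.getD (2*k+1) 'a']) := by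
  rw [evens_eq cs m hm, odds_eq cs m hm]
  have he := fm_getD cs (fun k => 2*k) m (by intro k hk; show 2*k < cs.length; omega)
  have ho := fm_getD cs (fun k => 2*k+1) m (by intro k hk; show 2*k+1 < cs.length; omega)
  simp only [] at he ho
  rw [he, ho]
  simp only [Option.getD_some, List.zip_map', List.map_map]
  rfl

-- ===== VERDICT (by name: the statement is the Claim_ definition above) =====
theorem hex_string_to_pairs_spec : Claim_equal_hex_string_to_pairs := by
  intro s _ hpre
  unfold Spec_hex_string_to_pairs hex_string_to_pairs hex_string_to_pairs_alt
  unfold Pre_hex_string_to_pairs at hpre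
  obtain ⟨m, hm⟩ : ∃ m, s.toList.length = 2*m := ⟨s.toList.length / 2, by omega⟩
  have hmod := mod_two_zero s.toList.length hpre
  simp only [hmod, ne_eq, not_true_eq_false, if_false]
  rw [a_canon s.toList m hm, b_canon s.toList m hm]
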